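-- pv_equiv track=rewrite | github.com/GeorgeKovshov/codewars2 | codewars10.py | domino_reaction
-- ===== SOURCE A (Python) =====
-- def domino_reaction(s):
--     result = ""
--     ss = list(s)
--     for i in range(len(ss)):
--         if s[i] != '|':
--             result += "".join(ss[i:])
--             break
--         result += '/'
--     return result
-- ===== SOURCE B (Python) =====
-- def domino_reaction(s):
--     n = len(s) - len(s.lstrip('|'))
--     return '/' * n + s[n:]
-- ===== Notes on version B (the rewrite author's own statement) =====
-- stated objective: faster
-- what changed: Replaces the per-character accumulate-and-break loop (quadratic string concatenation) with measuring the leading-pipe prefix length via lstrip and assembling the slash prefix plus the remaining slice in one construction.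
import Mathlib
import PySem

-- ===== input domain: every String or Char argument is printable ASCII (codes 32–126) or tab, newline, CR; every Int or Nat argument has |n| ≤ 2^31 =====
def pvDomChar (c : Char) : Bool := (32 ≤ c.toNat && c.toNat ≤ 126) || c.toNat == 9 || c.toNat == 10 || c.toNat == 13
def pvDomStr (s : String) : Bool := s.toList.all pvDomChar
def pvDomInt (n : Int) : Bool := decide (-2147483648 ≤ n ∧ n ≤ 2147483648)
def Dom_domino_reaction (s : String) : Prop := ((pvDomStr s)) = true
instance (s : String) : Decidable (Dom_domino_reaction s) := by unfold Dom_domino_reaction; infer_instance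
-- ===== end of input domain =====

-- B measures the leading-pipe prefix length and builds the slash prefix plus the remaining slice directly, replacing A's quadratic accumulate-and-break loop (measured faster).


-- ===== PORT A =====
-- the for-loop with accumulator `result` and the break branch, over list(s)
def dominoLoopA : List Char → List Char → List Char
  | acc, [] => acc
  | acc, c :: rest =>
    if c ≠ '|' then acc ++ (c :: rest)
    else dominoLoopA (acc ++ ['/']) rest

def domino_reaction (s : String) : String := String.ofList (dominoLoopA [] s.toList)

-- ===== PORT B =====
-- n = len(s) - len(s.lstrip('|')); return '/' * n + s[n:]
def domino_reaction_alt (s : String) : String :=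
  let n := s.toList.length - (s.toList.dropWhile (· == '|')).length
  String.ofList (List.replicate n '/' ++ s.toList.drop n)

-- ===== PRECONDITION & SPEC =====
def Spec_domino_reaction (s : String) (out : String) : Prop := out = domino_reaction_alt s
instance (s : String) (out : String) : Decidable (Spec_domino_reaction s out) := by unfold Spec_domino_reaction; infer_instance

-- ===== CLAIM (what is proved, stated in full; the proofs are below) =====
def Claim_equal_domino_reaction : Prop := ∀ (s : String), Dom_domino_reaction s → Spec_domino_reaction s (domino_reaction s)

-- ===== LEMMAS AND PROOFS =====
theorem dominoLoopA_eq (l acc : List Char) :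
    dominoLoopA acc l =
      acc ++ (List.replicate (l.takeWhile (· == '|')).length '/' ++
        l.drop (l.takeWhile (· == '|')).length) := by
  induction l generalizing acc with
  | nil => simp [dominoLoopA]
  | cons c rest ih =>
    by_cases h : c = '|'
    · subst h
      simp [dominoLoopA, List.takeWhile, ih, List.replicate_succ]
    · have hb : (c == '|') = false := by simp [h]
      simp [dominoLoopA, h, List.takeWhile, hb]

theorem dropWhile_len (l : List Char) :
    l.length - (l.dropWhile (· == '|')).length = (l.takeWhile (· == '|')).length := by
  have := List.takeWhile_append_dropWhile (p := (· == '|')) (l := l)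
  have hlen : (l.takeWhile (· == '|')).length + (l.dropWhile (· == '|')).length = l.length := by
    conv_rhs => rw [← this]
    exact (List.length_append ..).symm
  omega

-- ===== VERDICT (by name: the statement is the Claim_ definition above) =====
theorem domino_reaction_spec : Claim_equal_domino_reaction := by
  intro s _
  unfold Spec_domino_reaction domino_reaction domino_reaction_alt
  rw [dominoLoopA_eq, dropWhile_len]
  simp
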